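-- pv_equiv track=rewrite | github.com/tapasjsaha/leetcode-solutions | leetcode_299.py | getCowHint
-- ===== SOURCE A (Python) =====
-- def getCowHint(s_arr, g_arr):
--     cows = 0
--     for ch in s_arr:
--         try:
--             x = g_arr.index(ch)
--             cows += 1
--             g_arr.pop(x)
--         except ValueError:
--             continue
--     return cows
-- ===== SOURCE B (Python) =====
-- def getCowHint(s_arr, g_arr):
--     # Count-table pass instead of A's per-element .index scan.
--     # Like A, mutates g_arr in place (removes the matched elements).
--     remaining = {}
--     for s in s_arr:
--         remaining[s] = remaining.get(s, 0) + 1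
--     cows = 0
--     survivors = []
--     for g in g_arr:
--         if remaining.get(g, 0) > 0:
--             remaining[g] = remaining.get(g, 0) - 1
--             cows += 1
--         else:
--             survivors.append(g)
--     g_arr[:] = survivors
--     return cows
-- ===== Notes on version B (the rewrite author's own statement) =====
-- stated objective: faster
-- what changed: Replaces A's per-secret .index scan and pop over g_arr with a count table of s_arr built once plus a single survivors pass over g_arr (write-back reproduces A's in-place removals).
import Mathlib
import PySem

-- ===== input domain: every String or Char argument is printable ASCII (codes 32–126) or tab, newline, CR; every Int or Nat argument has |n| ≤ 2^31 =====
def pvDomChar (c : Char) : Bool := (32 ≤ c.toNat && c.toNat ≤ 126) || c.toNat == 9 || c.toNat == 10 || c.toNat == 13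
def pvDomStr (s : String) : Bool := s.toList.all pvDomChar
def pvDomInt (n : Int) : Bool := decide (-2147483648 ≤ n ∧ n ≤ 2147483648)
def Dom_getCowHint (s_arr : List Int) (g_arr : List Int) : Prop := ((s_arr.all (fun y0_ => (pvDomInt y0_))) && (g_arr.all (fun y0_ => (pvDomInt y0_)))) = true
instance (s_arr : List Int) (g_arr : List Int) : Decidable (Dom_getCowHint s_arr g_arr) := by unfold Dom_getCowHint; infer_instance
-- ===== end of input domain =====

-- B replaces A's per-element .index scan with a count table of s_arr and one pass over g_arr
-- (asymptotically faster); both Pythons mutate g_arr in place identically, the theorems here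
-- are about the return value.

-- ===== PORT A =====
-- one iteration of A's 'for ch in s_arr' loop; state = (cows, current g_arr)
def getCowHintStepA (st : Int × List Int) (ch : Int) : Int × List Int :=
  match PySem.List.index? st.2 ch with
  | none => st                                   -- ValueError: continue
  | some x =>
    match PySem.List.pop? st.2 (x : Int) with    -- x = g_arr.index(ch), always in range
    | some (_, rest) => (st.1 + 1, rest)
    | none => (st.1 + 1, st.2)                   -- unreachable (index? gives an in-range index)

def getCowHint (s_arr : List Int) (g_arr : List Int) : Int :=
  (s_arr.foldl getCowHintStepA ((0 : Int), g_arr)).1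

-- ===== PORT B =====
-- one iteration of B's 'for g in g_arr' loop; state = (remaining, cows, survivors)
def getCowHintStepB (st : PySem.Dict Int Int × Int × List Int) (g : Int) :
    PySem.Dict Int Int × Int × List Int :=
  if st.1.getD g 0 > 0 then (st.1.insert g (st.1.getD g 0 - 1), st.2.1 + 1, st.2.2)
  else (st.1, st.2.1, st.2.2 ++ [g])

def getCowHint_alt (s_arr : List Int) (g_arr : List Int) : Int :=
  let remaining := s_arr.foldl (fun d s => d.insert s (d.getD s 0 + 1)) PySem.Dict.empty
  (g_arr.foldl getCowHintStepB (remaining, (0 : Int), ([] : List Int))).2.1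

-- ===== PRECONDITION & SPEC =====
def Spec_getCowHint (s_arr : List Int) (g_arr : List Int) (out : Int) : Prop := out = getCowHint_alt s_arr g_arr
instance (s_arr : List Int) (g_arr : List Int) (out : Int) : Decidable (Spec_getCowHint s_arr g_arr out) := by unfold Spec_getCowHint; infer_instance

-- ===== CLAIM (what is proved, stated in full; the proofs are below) =====
def Claim_equal_getCowHint : Prop := ∀ (s_arr : List Int) (g_arr : List Int), Dom_getCowHint s_arr g_arr → Spec_getCowHint s_arr g_arr (getCowHint s_arr g_arr)

-- ===== LEMMAS AND PROOFS =====

-- A's loop counts the size of the multiset intersection of s_arr and (current) g_arr.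
theorem getCowHint_loopA (s : List Int) : ∀ (g : List Int) (c : Int),
    (s.foldl getCowHintStepA (c, g)).1
      = c + (Multiset.card ((↑s : Multiset Int) ∩ ↑g) : Int) := by
  induction s with
  | nil => intro g c; simp
  | cons a s ih =>
    intro g c
    simp only [List.foldl]
    by_cases h : a ∈ g
    · obtain ⟨k, hk⟩ : ∃ k, PySem.List.index? g a = some k :=
        Option.isSome_iff_exists.mp ((PySem.List.index?_isSome_iff g a).mpr h)
      have hk' : List.idxOf? a g = some k := by
        rw [← PySem.List.index?_eq_idxOf?]; exact hk
      obtain ⟨hklt, -, -⟩ := List.idxOf?_eq_some_iff.mp hk'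
      have herase : g.eraseIdx k = g.erase a := by
        rw [List.erase_eq_eraseIdx, hk']
      have hstep : getCowHintStepA (c, g) a = (c + 1, g.erase a) := by
        simp only [getCowHintStepA, PySem.List.index?_eq_idxOf?, hk',
          PySem.List.pop?_natCast g k hklt, herase]
      rw [hstep, ih]
      have hcard : Multiset.card ((↑(a :: s) : Multiset Int) ∩ ↑g)
          = Multiset.card ((↑s : Multiset Int) ∩ ↑(g.erase a)) + 1 := by
        rw [← Multiset.cons_coe,
          Multiset.cons_inter_of_pos _ (Multiset.mem_coe.mpr h),
          Multiset.card_cons, Multiset.coe_erase]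
      rw [hcard]; push_cast; ring
    · have hk : PySem.List.index? g a = none :=
        (PySem.List.index?_eq_none_iff g a).mpr h
      have hk' : List.idxOf? a g = none := by
        rw [← PySem.List.index?_eq_idxOf?]; exact hk
      have hstep : getCowHintStepA (c, g) a = (c, g) := by
        simp only [getCowHintStepA, PySem.List.index?_eq_idxOf?, hk']
      rw [hstep, ih]
      rw [← Multiset.cons_coe,
        Multiset.cons_inter_of_neg _ (fun hc => h (Multiset.mem_coe.mp hc))]

-- B's loop counts the same intersection, given that the dict holds m's counts.
theorem getCowHint_loopB (g : List Int) :
    ∀ (d : PySem.Dict Int Int) (m : Multiset Int) (c : Int) (surv : List Int),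
    (∀ v, d.getD v 0 = (m.count v : Int)) →
    (g.foldl getCowHintStepB (d, c, surv)).2.1
      = c + (Multiset.card (m ∩ (↑g : Multiset Int)) : Int) := by
  induction g with
  | nil => intro d m c surv _; simp
  | cons x g ih =>
    intro d m c surv hinv
    simp only [List.foldl]
    by_cases hm : x ∈ m
    · have hpos : d.getD x 0 > 0 := by
        rw [hinv x]; exact_mod_cast Multiset.count_pos.mpr hm
      have hstep : getCowHintStepB (d, c, surv) x
          = (d.insert x (d.getD x 0 - 1), c + 1, surv) := by
        simp [getCowHintStepB, hpos]
      rw [hstep]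
      have hinv' : ∀ v, (d.insert x (d.getD x 0 - 1)).getD v 0
          = ((m.erase x).count v : Int) := by
        intro v
        rw [PySem.Dict.getD_insert]
        by_cases hv : v = x
        · subst hv
          rw [if_pos rfl, hinv v, Multiset.count_erase_self]
          have h1 : 1 ≤ m.count v := Multiset.count_pos.mpr hm
          push_cast [Nat.cast_sub h1]; ring
        · rw [if_neg hv, hinv v, Multiset.count_erase_of_ne hv]
      rw [ih _ (m.erase x) _ _ hinv']
      have hcard : Multiset.card (m ∩ (↑(x :: g) : Multiset Int))
          = Multiset.card ((m.erase x) ∩ (↑g : Multiset Int)) + 1 := by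
        rw [← Multiset.cons_coe, Multiset.inter_comm,
          Multiset.cons_inter_of_pos _ hm, Multiset.card_cons, Multiset.inter_comm]
      rw [hcard]; push_cast; ring
    · have hz : d.getD x 0 = 0 := by
        rw [hinv x, Multiset.count_eq_zero_of_notMem hm]; rfl
      have hstep : getCowHintStepB (d, c, surv) x = (d, c, surv ++ [x]) := by
        simp [getCowHintStepB, hz]
      rw [hstep, ih _ m _ _ hinv]
      have hcard : (m ∩ (↑(x :: g) : Multiset Int)) = m ∩ (↑g : Multiset Int) := by
        rw [← Multiset.cons_coe, Multiset.inter_comm,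
          Multiset.cons_inter_of_neg _ hm, Multiset.inter_comm]
      rw [hcard]

-- ===== VERDICT (by name: the statement is the Claim_ definition above) =====
theorem getCowHint_spec : Claim_equal_getCowHint := by
  intro s_arr g_arr _
  show getCowHint s_arr g_arr = getCowHint_alt s_arr g_arr
  unfold getCowHint getCowHint_alt
  rw [getCowHint_loopA, PySem.Dict.foldl_insert_getD_add_one_eq_counter,
    getCowHint_loopB g_arr (PySem.Dict.counter s_arr) (↑s_arr) 0 []
      (fun v => by rw [PySem.Dict.getD_counter, Multiset.coe_count])]
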